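-- pv_equiv track=rewrite | github.com/YoannDupont/SEM | sem/util.py | correct_pos_tags
-- ===== SOURCE A (Python) =====
-- def correct_pos_tags(tags):
--     """
--     Correct POS tags following the "tag _tag" scheme to remove impossible transitions.
--     """
--     corrected = [[level2 for level2 in level1] for level1 in tags]
--     corrections = 0
--     for i in range(len(corrected)):
--         value = ""
--         j = len(corrected[i]) - 1
--         while j >= 0:
--             if value != "":
--                 if corrected[i][j][0] == "_":
--                     if corrected[i][j][1:] != value:
--                         corrected[i][j] = "_{}".format(value)
--                         corrections += 1
--                 else:
--                     if corrected[i][j][0] != "_" and corrected[i][j] != value: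
--                         corrected[i][j] = value
--                         corrections += 1
--                     value = ""
--             elif corrected[i][j][0] == "_":
--                 value = corrected[i][j][1:]
--             j -= 1
--     return corrected
-- ===== SOURCE B (Python) =====
-- def _fix_run(run):
--     # run is a maximal block of consecutive "_"-prefixed tags.
--     # The rightmost tag with a non-empty suffix governs: everything at or to
--     # its left becomes "_" + value; empty-suffix "_" tags to its right stay.
--     for p in range(len(run) - 1, -1, -1):
--         v = run[p][1:]
--         if v:
--             return ["_" + v] * (p + 1) + run[p + 1:], v
--     return list(run), None
--
--
-- def correct_pos_tags(tags):
--     """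
--     Correct POS tags following the "tag _tag" scheme to remove impossible transitions.
--     """
--     out = []
--     for row in tags:
--         new = []
--         i = 0
--         n = len(row)
--         while i < n:
--             if row[i].startswith("_"):
--                 j = i
--                 while j < n and row[j].startswith("_"):
--                     j += 1
--                 fixed, v = _fix_run(row[i:j])
--                 if v is not None and new:
--                     new[-1] = v
--                 new.extend(fixed)
--                 i = j
--             else:
--                 new.append(row[i])
--                 i += 1
--         out.append(new)
--     return out
-- ===== Notes on version B (the rewrite author's own statement) =====
-- stated objective: alternative
-- what changed: A's single stateful right-to-left index loop (carrying 'value' and mutating in place) is replaced by a forward segmentation of each row into maximal runs of '_'-prefixed tags, rewriting each run and the base tag before it in one block once the run's governing suffix is found.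
import Mathlib
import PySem

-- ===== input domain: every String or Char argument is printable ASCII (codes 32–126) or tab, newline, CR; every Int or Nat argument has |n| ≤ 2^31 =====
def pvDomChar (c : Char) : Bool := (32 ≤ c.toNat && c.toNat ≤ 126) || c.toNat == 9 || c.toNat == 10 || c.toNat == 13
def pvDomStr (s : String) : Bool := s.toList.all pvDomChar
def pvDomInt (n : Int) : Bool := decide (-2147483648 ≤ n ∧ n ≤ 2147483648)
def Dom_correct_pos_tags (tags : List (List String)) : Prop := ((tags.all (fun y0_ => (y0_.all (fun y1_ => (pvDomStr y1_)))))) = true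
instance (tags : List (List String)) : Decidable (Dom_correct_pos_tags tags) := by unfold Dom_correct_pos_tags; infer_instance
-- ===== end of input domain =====

-- B replaces A's single stateful right-to-left index loop by a forward segmentation of each
-- row into maximal runs of "_"-tags, rewriting each run (and the base tag before it) at once;
-- objective: alternative decomposition, same cost.

-- ===== PORT A =====
-- the inner 'while j >= 0' loop of A: state = (current row, value), j+1 is the index being read
-- (row indices are always in range in A; only tag[0] on an empty tag raises — excluded by Pre_)
def pvLoopA (row : List String) (value : String) : Nat → List String
  | 0 => row
  | j+1 =>
    let t := row.getD j ""
    if value ≠ "" then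
      if PySem.Str.pyGet? t 0 = some '_' then
        if PySem.Str.slice t (some 1) none ≠ value then
          pvLoopA (row.set j ("_" ++ value)) value j
        else
          pvLoopA row value j
      else
        if PySem.Str.pyGet? t 0 ≠ some '_' ∧ t ≠ value then
          pvLoopA (row.set j value) "" j
        else
          pvLoopA row "" j
    else
      if PySem.Str.pyGet? t 0 = some '_' then
        pvLoopA row (PySem.Str.slice t (some 1) none) j
      else
        pvLoopA row "" j

def correct_pos_tags (tags : List (List String)) : List (List String) :=
  tags.map (fun row => pvLoopA row "" row.length)

-- ===== PORT B =====
def pvIsU (t : String) : Bool := PySem.Str.startswith t "_"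

-- _fix_run of Source B: scan p from the right end of the run for the first non-empty suffix
def pvFixRunAux (run : List String) : Nat → List String × Option String
  | 0 => (run, none)
  | p+1 =>
    let v := PySem.Str.slice (run.getD p "") (some 1) none
    if v ≠ "" then (List.replicate (p+1) ("_" ++ v) ++ run.drop (p+1), some v)
    else pvFixRunAux run p

def pvFixRun (run : List String) : List String × Option String := pvFixRunAux run run.length

-- the row loop of Source B; the 'new[-1] = v' back-patch of the base tag becomes a lookahead
-- at the run that follows it (same output, functional style)
def pvProcB : List String → List String
  | [] => []
  | t :: rest =>
    if pvIsU t then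
      (pvFixRun (t :: rest.takeWhile pvIsU)).1 ++ pvProcB (rest.dropWhile pvIsU)
    else
      let r := pvFixRun (rest.takeWhile pvIsU)
      (match r.2 with | some v => v | none => t) :: r.1 ++ pvProcB (rest.dropWhile pvIsU)
termination_by l => l.length
decreasing_by
  · have := List.length_dropWhile_le pvIsU rest; simp; omega
  · have := List.length_dropWhile_le pvIsU rest; simp; omega

def correct_pos_tags_alt (tags : List (List String)) : List (List String) :=
  tags.map pvProcB

-- ===== PRECONDITION & SPEC =====
-- Pre_ excludes rows containing an empty-string tag: Python A evaluates tag[0] on every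
-- element of every row, so any empty tag raises IndexError.
def Pre_correct_pos_tags (tags : List (List String)) : Prop :=
  ∀ row ∈ tags, ∀ t ∈ row, t ≠ ""
instance (tags : List (List String)) : Decidable (Pre_correct_pos_tags tags) := by
  unfold Pre_correct_pos_tags; infer_instance
def pvWitness_correct_pos_tags : List (List String) := [["N", "_", "_x", "V", "_y"]]

def Spec_correct_pos_tags (tags : List (List String)) (out : List (List String)) : Prop := out = correct_pos_tags_alt tags
instance (tags : List (List String)) (out : List (List String)) : Decidable (Spec_correct_pos_tags tags out) := by unfold Spec_correct_pos_tags; infer_instance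

-- ===== CLAIM (what is proved, stated in full; the proofs are below) =====
def Claim_equal_correct_pos_tags : Prop := ∀ (tags : List (List String)), Dom_correct_pos_tags tags → Pre_correct_pos_tags tags → Spec_correct_pos_tags tags (correct_pos_tags tags)

-- ===== LEMMAS AND PROOFS =====

-- the suffix tag[1:]
def pvSuffix (t : String) : String := PySem.Str.slice t (some 1) none

-- A's right-to-left scan, rephrased as a left-to-right scan of the REVERSED row:
-- .1 = rewritten (reversed) row, .2 = final 'value'
def pvHpair (v : String) : List String → List String × String
  | [] => ([], v)
  | t :: ts =>
    if v = "" then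
      if pvIsU t then (t :: (pvHpair (pvSuffix t) ts).1, (pvHpair (pvSuffix t) ts).2)
      else (t :: (pvHpair "" ts).1, (pvHpair "" ts).2)
    else
      if pvIsU t then (("_" ++ v) :: (pvHpair v ts).1, (pvHpair v ts).2)
      else (v :: (pvHpair "" ts).1, (pvHpair "" ts).2)

lemma pvIsU_iff (t : String) : pvIsU t = true ↔ PySem.Str.pyGet? t 0 = some '_' := by
  unfold pvIsU
  simp [PySem.Chars.startswith_iff]
  cases h : t.toList with
  | nil => simp [PySem.List.pyGet?]
  | cons c cs =>
    simp [List.cons_prefix_cons, PySem.List.pyGet?, PySem.List.pyIdx?, eq_comm]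

lemma pvUsplit (t : String) (h : pvIsU t = true) : t = "_" ++ pvSuffix t := by
  rw [pvIsU_iff] at h
  apply String.toList_inj.mp
  rw [String.toList_append]
  have hs : (pvSuffix t).toList = t.toList.tail := by
    unfold pvSuffix
    simp [PySem.Str.toList_slice, PySem.List.slice_from_one]
  simp at h
  cases ht : t.toList with
  | nil => rw [ht] at h; simp [PySem.List.pyGet?] at h
  | cons c cs =>
    rw [ht] at h
    simp [PySem.List.pyGet?, PySem.List.pyIdx?] at h
    simp [hs, ht, h]

lemma pvLoopA_append (zs ys : List String) (v : String) (j : Nat) (hj : j ≤ ys.length) :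
    pvLoopA (ys ++ zs) v j = pvLoopA ys v j ++ zs := by
  induction j generalizing ys v with
  | zero => simp [pvLoopA]
  | succ j ih =>
    have hjl : j < ys.length := hj
    have hget : (ys ++ zs).getD j "" = ys.getD j "" := List.getD_append ys zs "" j hjl
    have hset : ∀ x : String, (ys ++ zs).set j x = ys.set j x ++ zs := by
      intro x; rw [List.set_append]; simp [hjl]
    simp only [pvLoopA, hget, hset]
    split_ifs with h1 h2 h3 h4 h5 <;>
      exact ih _ _ (by simpa using Nat.le_of_lt hjl)

lemma pvLoopA_eq_hpair (ys : List String) (v : String) :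
    pvLoopA ys v ys.length = (pvHpair v ys.reverse).1.reverse := by
  induction ys using List.reverseRecOn generalizing v with
  | nil => simp [pvLoopA, pvHpair]
  | append_singleton xs t ih =>
    have hlen : (xs ++ [t]).length = xs.length + 1 := by simp
    have hget : (xs ++ [t]).getD xs.length "" = t := by
      rw [List.getD_append_right xs [t] "" xs.length le_rfl]; simp [List.getD]
    have hset : ∀ x : String, (xs ++ [t]).set xs.length x = xs ++ [x] := by
      intro x; rw [List.set_append]; simp
    rw [hlen, List.reverse_append]
    simp only [pvLoopA, hget, List.reverse_cons]
    by_cases hv : v = ""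
    · by_cases hU : pvIsU t = true
      · have hA : PySem.List.pyGet? t.toList 0 = some '_' := by
          simpa using (pvIsU_iff t).mp hU
        simp [pvHpair, hv, hU, hA, ih, pvLoopA_append, pvSuffix]
      · have hA : ¬ PySem.List.pyGet? t.toList 0 = some '_' := by
          intro h; exact hU ((pvIsU_iff t).mpr (by simpa using h))
        simp [pvHpair, hv, hU, hA, ih, pvLoopA_append]
    · by_cases hU : pvIsU t = true
      · have hA : PySem.List.pyGet? t.toList 0 = some '_' := by
          simpa using (pvIsU_iff t).mp hU
        by_cases hsuf : PySem.Str.slice t (some 1) none = v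
        · have ht : t = "_" ++ v := by
            have := pvUsplit t hU; rwa [pvSuffix, hsuf] at this
          simp [pvHpair, hv, hU, hA, hsuf, ih, pvLoopA_append, ← ht]
        · simp [pvHpair, hv, hU, hA, hsuf, ih, hset, pvLoopA_append]
      · have hA : ¬ PySem.List.pyGet? t.toList 0 = some '_' := by
          intro h; exact hU ((pvIsU_iff t).mpr (by simpa using h))
        by_cases htv : t = v
        · subst htv
          simp [pvHpair, hv, hU, hA, ih, pvLoopA_append]
        · simp [pvHpair, hv, hU, hA, htv, ih, pvLoopA_append]

lemma pvHpair_append (xs ys : List String) (v : String) :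
    pvHpair v (xs ++ ys)
      = ((pvHpair v xs).1 ++ (pvHpair (pvHpair v xs).2 ys).1, (pvHpair (pvHpair v xs).2 ys).2) := by
  induction xs generalizing v with
  | nil => simp [pvHpair]
  | cons t ts ih =>
    simp only [List.cons_append, pvHpair]
    split_ifs <;> simp [ih]

lemma pvHpair_state_nonU (xs : List String) (b : String) (v : String) (hb : pvIsU b = false) :
    (pvHpair v (xs ++ [b])).2 = "" := by
  rw [pvHpair_append]
  by_cases hu : (pvHpair v xs).2 = "" <;> simp [pvHpair, hb, hu]

lemma pvHpair_allU (ws : List String) (v : String) (hU : ∀ x ∈ ws, pvIsU x = true) (hv : v ≠ "") :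
    pvHpair v ws = (ws.map (fun _ => "_" ++ v), v) := by
  induction ws with
  | nil => simp [pvHpair]
  | cons w ws ih =>
    have hw : pvIsU w = true := hU w (by simp)
    simp [pvHpair, hv, hw, ih (fun x hx => hU x (by simp [hx]))]

lemma pvFixRunAux_append (xs : List String) (w : String) (j : Nat) (hj : j ≤ xs.length) :
    pvFixRunAux (xs ++ [w]) j = ((pvFixRunAux xs j).1 ++ [w], (pvFixRunAux xs j).2) := by
  induction j with
  | zero => simp [pvFixRunAux]
  | succ p ih =>
    have hp : p < xs.length := hj
    have hget : (xs ++ [w]).getD p "" = xs.getD p "" := List.getD_append xs [w] "" p hp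
    have hdrop : (xs ++ [w]).drop (p+1) = xs.drop (p+1) ++ [w] :=
      List.drop_append_of_le_length hp
    simp only [pvFixRunAux, hget, hdrop]
    split_ifs with h
    · simp
    · exact ih (Nat.le_of_lt hp)

lemma pvRunMain (ws : List String) (hU : ∀ x ∈ ws, pvIsU x = true) :
    (pvHpair "" ws).1.reverse = (pvFixRun ws.reverse).1
    ∧ (pvHpair "" ws).2 = ((pvFixRun ws.reverse).2).getD ""
    ∧ ∀ v, (pvFixRun ws.reverse).2 = some v → v ≠ "" := by
  induction ws with
  | nil => simp [pvHpair, pvFixRun, pvFixRunAux]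
  | cons w ws ih =>
    have hw : pvIsU w = true := hU w (by simp)
    have hU' : ∀ x ∈ ws, pvIsU x = true := fun x hx => hU x (by simp [hx])
    obtain ⟨ih1, ih2, ih3⟩ := ih hU'
    have hget : (ws.reverse ++ [w]).getD ws.length "" = w := by
      rw [List.getD_append_right ws.reverse [w] "" ws.length (by simp)]; simp [List.getD]
    have hfix : pvFixRun ((w :: ws).reverse)
        = pvFixRunAux (ws.reverse ++ [w]) (ws.length + 1) := by
      simp [pvFixRun, pvFixRunAux]
    by_cases hsw : PySem.Str.slice w (some 1) none = ""
    · have hfix2 : pvFixRun ((w :: ws).reverse)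
          = ((pvFixRun ws.reverse).1 ++ [w], (pvFixRun ws.reverse).2) := by
        rw [hfix]
        simp only [pvFixRunAux, hget, hsw]
        rw [if_neg (by simp)]
        rw [pvFixRunAux_append ws.reverse w ws.length (by simp)]
        simp [pvFixRun]
      refine ⟨?_, ?_, ?_⟩
      · rw [hfix2]; simp [pvHpair, hw, pvSuffix, hsw, ih1]
      · rw [hfix2]; simpa [pvHpair, hw, pvSuffix, hsw] using ih2
      · rw [hfix2]; exact ih3
    · set v := PySem.Str.slice w (some 1) none with hv
      have hwv : w = "_" ++ v := pvUsplit w hw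
      have hfix2 : pvFixRun ((w :: ws).reverse)
          = (List.replicate (ws.length + 1) ("_" ++ v), some v) := by
        rw [hfix]
        simp only [pvFixRunAux, hget]
        rw [if_pos hsw]
        rw [List.drop_eq_nil_of_le (by simp), List.append_nil]
      have hall := pvHpair_allU ws v hU' hsw
      refine ⟨?_, ?_, ?_⟩
      · rw [hfix2]
        simp [pvHpair, hw, pvSuffix, ← hv, hall, List.map_const',
          List.replicate_succ', ← hwv]
      · rw [hfix2]
        simp [pvHpair, hw, pvSuffix, ← hv, hall]
      · rw [hfix2]
        intro u hu
        have h := Option.some.inj hu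
        rw [← h]
        exact hsw

lemma pvRow_eq : ∀ (row : List String),
    (pvHpair "" row.reverse).1.reverse = pvProcB row
  | [] => by simp [pvHpair, pvProcB]
  | t :: rest => by
    have hsplit : rest.takeWhile pvIsU ++ rest.dropWhile pvIsU = rest :=
      List.takeWhile_append_dropWhile
    have hUrun : ∀ x ∈ (rest.takeWhile pvIsU).reverse, pvIsU x = true := by
      intro x hx; exact List.mem_takeWhile_imp (List.mem_reverse.mp hx)
    have hstate : (pvHpair "" (rest.dropWhile pvIsU).reverse).2 = "" := by
      cases hd : rest.dropWhile pvIsU with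
      | nil => simp [pvHpair]
      | cons b r'' =>
        have hb : pvIsU b = false := by
          have hne : rest.dropWhile pvIsU ≠ [] := by simp [hd]
          have := List.head_dropWhile_not pvIsU hne
          simpa [hd] using this
        have hrev : (b :: r'').reverse = r''.reverse ++ [b] := by simp
        rw [hrev]
        exact pvHpair_state_nonU r''.reverse b "" hb
    have ihrest := pvRow_eq (rest.dropWhile pvIsU)
    by_cases hU : pvIsU t = true
    · have hUrun' : ∀ x ∈ (t :: rest.takeWhile pvIsU).reverse, pvIsU x = true := by
        intro x hx
        rcases List.mem_cons.mp (List.mem_reverse.mp hx) with h | h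
        · exact h ▸ hU
        · exact List.mem_takeWhile_imp h
      have hrow : (t :: rest).reverse
          = (rest.dropWhile pvIsU).reverse ++ (t :: rest.takeWhile pvIsU).reverse := by
        rw [← List.reverse_append]
        simp [hsplit]
      obtain ⟨r1, r2, r3⟩ := pvRunMain ((t :: rest.takeWhile pvIsU).reverse) hUrun'
      rw [List.reverse_reverse] at r1
      simp only [List.reverse_cons] at r1
      rw [hrow, pvHpair_append, hstate]
      simp only [pvProcB, hU, if_pos]
      simp [List.reverse_append, r1, ihrest]
    · have hrow : (t :: rest).reverse
          = (rest.dropWhile pvIsU).reverse ++ ((rest.takeWhile pvIsU).reverse ++ [t]) := by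
        rw [← List.reverse_cons, ← List.reverse_append]
        simp [hsplit]
      obtain ⟨r1, r2, r3⟩ := pvRunMain ((rest.takeWhile pvIsU).reverse) hUrun
      rw [List.reverse_reverse] at r1 r2 r3
      rw [hrow, pvHpair_append, hstate, pvHpair_append, r2]
      cases hfix : (pvFixRun (rest.takeWhile pvIsU)).2 with
      | none =>
        simp only [Option.getD_none]
        simp [pvProcB, hU, hfix, pvHpair, List.reverse_append, r1, ihrest]
      | some v =>
        have hv : v ≠ "" := r3 v hfix
        simp only [Option.getD_some]
        simp [pvProcB, hU, hfix, pvHpair, hv, List.reverse_append, r1, ihrest]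
termination_by row => row.length
decreasing_by
  have := List.length_dropWhile_le pvIsU rest
  simp
  omega

-- ===== VERDICT (by name: the statement is the Claim_ definition above) =====
theorem correct_pos_tags_spec : Claim_equal_correct_pos_tags := by
  intro tags _ _
  unfold Spec_correct_pos_tags correct_pos_tags correct_pos_tags_alt
  refine List.map_congr_left (fun row _ => ?_)
  rw [pvLoopA_eq_hpair, pvRow_eq]
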